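-- pv_equiv track=rewrite | github.com/minwookkim115/Algorithm | 프로그래머스/1/131128. 숫자 짝꿍/숫자 짝꿍.py | solution
-- ===== SOURCE A (Python) =====
-- def solution(X, Y):
--     answer = ''
--
--     check = []
--     for num in range(0, 10):
--         count_x = 0
--         count_y = 0
--         if str(num) in X and str(num) in Y:
--             count_x = X.count(str(num))
--             count_y = Y.count(str(num))
--
--             if count_x > count_y:
--                 for i in range(count_y):
--                     check.append(str(num))
--             else:
--                 for i in range(count_x):
--                     check.append(str(num))
--     check.sort(reverse=True)
--
--     if len(check) == 0:
--         answer = '-1'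
--     elif check[0] == '0':
--         answer = '0'
--     else:
--         for i in range(len(check)):
--             answer += check[i]
--     return answer
-- ===== SOURCE B (Python) =====
-- def solution(X, Y):
--     xs = sorted((c for c in X if c.isdigit()), reverse=True)
--     ys = sorted((c for c in Y if c.isdigit()), reverse=True)
--     out = []
--     i = j = 0
--     while i < len(xs) and j < len(ys):
--         if xs[i] == ys[j]:
--             out.append(xs[i])
--             i += 1
--             j += 1
--         elif xs[i] > ys[j]:
--             i += 1
--         else:
--             j += 1
--     if not out:
--         return '-1'
--     if out[0] == '0':
--         return '0'
--     return ''.join(out)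
-- ===== Notes on version B (the rewrite author's own statement) =====
-- stated objective: alternative
-- what changed: Instead of counting each digit 0-9 in both strings and taking per-digit minima, B sorts the digit characters of each string descending and computes the multiset intersection with a two-pointer merge, which directly yields the common digits in descending order.
import Mathlib
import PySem

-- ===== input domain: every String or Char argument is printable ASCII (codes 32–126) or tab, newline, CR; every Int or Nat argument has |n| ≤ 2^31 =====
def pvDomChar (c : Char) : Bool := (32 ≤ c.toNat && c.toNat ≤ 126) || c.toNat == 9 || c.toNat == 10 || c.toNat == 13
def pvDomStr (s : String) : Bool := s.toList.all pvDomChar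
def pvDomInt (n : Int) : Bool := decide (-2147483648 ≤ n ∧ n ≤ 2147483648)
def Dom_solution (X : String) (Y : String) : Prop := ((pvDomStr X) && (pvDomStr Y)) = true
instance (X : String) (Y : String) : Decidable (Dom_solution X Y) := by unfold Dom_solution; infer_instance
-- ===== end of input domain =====

-- B replaces A's per-digit counting (count each of 0..9 in both strings, append min copies, sort)
-- by sorting each string's digit characters descending and intersecting the two sorted multisets
-- with a two-pointer merge (objective: alternative algorithm; same asymptotic cost).

-- ===== PORT A =====
-- body of A's 'for num in range(0, 10)' loop (the two inner 'for i in range(...)' append loops included)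
def solABody (X : String) (Y : String) (check : List String) (num : Int) : List String :=
  if PySem.Str.isIn (PySem.Int.toStr num) X && PySem.Str.isIn (PySem.Int.toStr num) Y then
    let count_x := PySem.Str.count X (PySem.Int.toStr num)
    let count_y := PySem.Str.count Y (PySem.Int.toStr num)
    if count_x > count_y then
      (PySem.List.pyRange 0 (count_y : Int)).foldl (fun ch _ => ch ++ [PySem.Int.toStr num]) check
    else
      (PySem.List.pyRange 0 (count_x : Int)).foldl (fun ch _ => ch ++ [PySem.Int.toStr num]) check
  else check

def solution (X : String) (Y : String) : String :=
  let check : List String := (PySem.List.pyRange 0 10).foldl (solABody X Y) []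
  let check := PySem.List.sorted check (fun s => s) true
  if PySem.List.len check == 0 then "-1"
  else if PySem.List.pyGetD check 0 "" == "0" then "0"
  else (PySem.List.pyRange 0 (PySem.List.len check)).foldl
        (fun answer i => answer ++ PySem.List.pyGetD check i "") ""

-- ===== PORT B =====
-- 'sorted((c for c in s if c.isdigit()), reverse=True)' (Python's 1-char strings are Chars here)
def digitsDesc (s : String) : List Char :=
  PySem.List.sorted (s.toList.filter (fun c => PySem.Chars.isdigit c)) (fun c => c) true

-- B's two-pointer while loop: the pointers i, j walking forward become structural
-- recursion on the two list suffixes; branches in the same order as in Source B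
def mergeDesc : List Char → List Char → List Char
  | [], _ => []
  | _ :: _, [] => []
  | x :: xs, y :: ys =>
    if x = y then x :: mergeDesc xs ys
    else if x > y then mergeDesc xs (y :: ys)
    else mergeDesc (x :: xs) ys
termination_by a b => a.length + b.length
decreasing_by all_goals (simp only [List.length_cons]; omega)

def solution_alt (X : String) (Y : String) : String :=
  let out := mergeDesc (digitsDesc X) (digitsDesc Y)
  if out == [] then "-1"
  else if PySem.List.pyGet? out 0 == some '0' then "0"
  else PySem.Str.join "" (out.map (fun c => String.ofList [c]))

-- ===== PRECONDITION & SPEC =====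
def Spec_solution (X : String) (Y : String) (out : String) : Prop := out = solution_alt X Y
instance (X : String) (Y : String) (out : String) : Decidable (Spec_solution X Y out) := by unfold Spec_solution; infer_instance

-- ===== CLAIM (what is proved, stated in full; the proofs are below) =====
def Claim_equal_solution : Prop := ∀ (X : String) (Y : String), Dom_solution X Y → Spec_solution X Y (solution X Y)

-- ===== LEMMAS AND PROOFS =====

-- min of the two per-digit character counts; both programs' outputs are determined by it
def mcSol (X Y : String) (d : Char) : Nat := min (X.toList.count d) (Y.toList.count d)

def ascDigits : List Char := ['0','1','2','3','4','5','6','7','8','9']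
def descDigits : List Char := ['9','8','7','6','5','4','3','2','1','0']

-- the canonical descending block list: for each d of ds in order, a d copies of d
def blocksOf (ds : List Char) (a : Char → Nat) : List Char :=
  ds.flatMap (fun d => List.replicate (a d) d)

-- ---------- A-side characterisation ----------

theorem countGo_singleton (c : Char) (l : List Char) : ∀ (fuel acc : Nat), l.length ≤ fuel →
    PySem.Chars.count.go [c] fuel l acc = acc + l.count c := by
  induction l with
  | nil => intro fuel acc _; cases fuel <;> simp [PySem.Chars.count.go]
  | cons h t ih =>
    intro fuel acc hf
    cases fuel with
    | zero => simp at hf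
    | succ n =>
      by_cases hc : c = h
      · subst hc
        simp [PySem.Chars.count.go, List.isPrefixOf, ih n (acc+1) (by simpa using hf)]
        omega
      · simp [PySem.Chars.count.go, List.isPrefixOf, hc, Ne.symm hc, ih n acc (by simpa using hf)]

-- Python's s.count(t) for a single-character t is the character count
theorem count_singleton (cs : List Char) (c : Char) : PySem.Chars.count cs [c] = cs.count c := by
  simpa [PySem.Chars.count] using countGo_singleton c cs cs.length 0 le_rfl

theorem str_count_singleton (X : String) (c : Char) :
    PySem.Str.count X (String.ofList [c]) = X.toList.count c := by
  rw [PySem.Str.count_eq]; simp [count_singleton]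

theorem foldl_append_const {α β : Type} (l : List β) (acc : List α) (v : α) :
    l.foldl (fun a _ => a ++ [v]) acc = acc ++ List.replicate l.length v := by
  induction l generalizing acc with
  | nil => simp
  | cons h t ih => simp [ih, ← List.replicate_succ]

theorem isIn_false_count (X : String) (c : Char) (h : PySem.Str.isIn (String.ofList [c]) X = false) :
    X.toList.count c = 0 := by
  rw [PySem.Str.isIn_eq] at h
  simp [PySem.Chars.isIn_eq_false_iff, List.singleton_infix_iff] at h
  simp [List.count_eq_zero, h]

theorem solABody_eq (X Y : String) (check : List String) (num : Int) (d : Char)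
    (h : PySem.Int.toStr num = String.ofList [d]) :
    solABody X Y check num = check ++ List.replicate (mcSol X Y d) (String.ofList [d]) := by
  unfold solABody
  rw [h]
  by_cases hx : PySem.Str.isIn (String.ofList [d]) X = true
  · by_cases hy : PySem.Str.isIn (String.ofList [d]) Y = true
    · simp only [hx, hy, Bool.and_self, str_count_singleton]
      by_cases hgt : X.toList.count d > Y.toList.count d
      · rw [if_pos hgt, foldl_append_const]
        simp [PySem.List.pyRange_zero_natCast, mcSol]
        omega
      · rw [if_neg hgt, foldl_append_const]
        simp [PySem.List.pyRange_zero_natCast, mcSol]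
        omega
    · have hy' : PySem.Str.isIn (String.ofList [d]) Y = false := by simpa using hy
      have h0 : Y.toList.count d = 0 := isIn_false_count Y d hy'
      rw [hy']
      simp [mcSol, h0]
  · have hx' : PySem.Str.isIn (String.ofList [d]) X = false := by simpa using hx
    have h0 : X.toList.count d = 0 := isIn_false_count X d hx'
    rw [hx']
    simp [mcSol, h0]

theorem check_eq (X Y : String) :
    (PySem.List.pyRange 0 10).foldl (solABody X Y) [] =
      ascDigits.flatMap (fun d => List.replicate (mcSol X Y d) (String.ofList [d])) := by
  rw [show PySem.List.pyRange 0 10 = [0,1,2,3,4,5,6,7,8,9] from by decide]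
  simp only [List.foldl_cons, List.foldl_nil]
  rw [solABody_eq X Y _ 0 '0' (by decide), solABody_eq X Y _ 1 '1' (by decide),
      solABody_eq X Y _ 2 '2' (by decide), solABody_eq X Y _ 3 '3' (by decide),
      solABody_eq X Y _ 4 '4' (by decide), solABody_eq X Y _ 5 '5' (by decide),
      solABody_eq X Y _ 6 '6' (by decide), solABody_eq X Y _ 7 '7' (by decide),
      solABody_eq X Y _ 8 '8' (by decide), solABody_eq X Y _ 9 '9' (by decide)]
  simp [ascDigits]

-- sorting with reverse=True and the identity key is sorting with the order-dual key
theorem sorted_rev_eq_dual {α : Type} [LinearOrder α] (xs : List α) :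
    PySem.List.sorted xs (fun s => s) true = PySem.List.sorted xs (fun s => OrderDual.toDual s) false := by
  rw [PySem.List.sorted_rev_eq_foldl_insertBy, PySem.List.sorted_eq_foldl_insertBy]
  congr 1

theorem sing_le_sing {a b : Char} (h : a ≤ b) : String.ofList [a] ≤ String.ofList [b] := by
  rw [String.le_iff_toList_le]
  simp only [String.toList_ofList]
  by_cases hab : a = b
  · simp [hab]
  · exact le_of_lt (List.Lex.rel (lt_of_le_of_ne h hab))

theorem pairwise_desc_flatMap {β : Type} [Preorder β] (ds : List Char) (n : Char → Nat) (g : Char → β)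
    (hp : ds.Pairwise (fun c d => g d ≤ g c)) :
    (ds.flatMap (fun d => List.replicate (n d) (g d))).Pairwise (fun a b => b ≤ a) := by
  rw [List.flatMap_def, List.pairwise_flatten]
  constructor
  · intro l hl
    simp only [List.mem_map] at hl
    obtain ⟨d, _, rfl⟩ := hl
    exact List.pairwise_replicate.mpr (Or.inr le_rfl)
  · rw [List.pairwise_map]
    refine hp.imp_of_mem ?_
    intro c d hc hd h x hx y hy
    rw [List.eq_of_mem_replicate hx, List.eq_of_mem_replicate hy]
    exact h

theorem sorted_check (X Y : String) :
    PySem.List.sorted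
        (ascDigits.flatMap (fun d => List.replicate (mcSol X Y d) (String.ofList [d]))) (fun s => s) true =
      descDigits.flatMap (fun d => List.replicate (mcSol X Y d) (String.ofList [d])) := by
  rw [sorted_rev_eq_dual]
  rw [PySem.List.sorted_eq_sorted_of_perm _
        (descDigits.flatMap (fun d => List.replicate (mcSol X Y d) (String.ofList [d])))
        _ OrderDual.toDual.injective
        (List.Perm.flatMap_right _
          (by rw [show ascDigits = descDigits.reverse from by decide]; exact List.reverse_perm descDigits))]
  refine PySem.List.sorted_eq_self_of_pairwise _ _ ?_
  have hp : descDigits.Pairwise (fun c d => String.ofList [d] ≤ String.ofList [c]) :=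
    (by decide : descDigits.Pairwise (fun c d => d ≤ c)).imp (fun h => sing_le_sing h)
  exact (pairwise_desc_flatMap descDigits (mcSol X Y) (fun d => String.ofList [d]) hp).imp (fun h => h)

theorem flatMap_replicate_map (m : Char → Nat) :
    descDigits.flatMap (fun d => List.replicate (m d) (String.ofList [d])) =
      (blocksOf descDigits m).map (fun c => String.ofList [c]) := by
  simp [blocksOf, List.map_flatMap, List.map_replicate]

theorem join_nil_flatten (ps : List (List Char)) : PySem.Chars.join [] ps = ps.flatten := by
  induction ps with
  | nil => simp [PySem.Chars.join, List.intercalate]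
  | cons h t ih =>
    cases t with
    | nil => simp [PySem.Chars.join, List.intercalate]
    | cons h2 t2 =>
      simp only [PySem.Chars.join, List.intercalate, List.intersperse] at *
      simp [ih]

theorem toList_foldl_concat (l : List String) (acc : String) :
    (l.foldl (· ++ ·) acc).toList = acc.toList ++ (l.map String.toList).flatten := by
  induction l generalizing acc with
  | nil => simp
  | cons h t ih => simp [ih]

theorem sing_beq_zero_false (c : Char) (hc : c ≠ '0') : (String.ofList [c] == "0") = false := by
  have : ¬ (String.ofList [c] = "0") := by
    intro h
    rw [show ("0":String) = String.ofList ['0'] from rfl, String.ofList_inj] at h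
    simp at h; exact hc h
  simpa using this

-- the index-driven concatenation loop concatenates the list's elements
theorem foldl_concat_eq (ch : List String) :
    (PySem.List.pyRange 0 (PySem.List.len ch)).foldl
      (fun answer i => answer ++ PySem.List.pyGetD ch i "") ""
    = ch.foldl (· ++ ·) "" := by
  calc (PySem.List.pyRange 0 (PySem.List.len ch)).foldl
          (fun answer i => answer ++ PySem.List.pyGetD ch i "") ""
      = ((PySem.List.pyRange 0 (PySem.List.len ch)).map (fun j => PySem.List.pyGetD ch j "")).foldl
          (· ++ ·) "" := (List.foldl_map).symm
    _ = ch.foldl (· ++ ·) "" := by rw [PySem.List.map_pyGetD_pyRange_zero]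

-- the common tail: A's final branches on check = L.map singleton agree with B's final branches on out = L
theorem final_branches (L : List Char) :
    (if PySem.List.len (L.map (fun c => String.ofList [c])) == 0 then "-1"
     else if PySem.List.pyGetD (L.map (fun c => String.ofList [c])) 0 "" == "0" then "0"
     else (PySem.List.pyRange 0 (PySem.List.len (L.map (fun c => String.ofList [c])))).foldl
        (fun answer i => answer ++ PySem.List.pyGetD (L.map (fun c => String.ofList [c])) i "") "")
    = (if L == [] then "-1"
       else if PySem.List.pyGet? L 0 == some '0' then "0"
       else PySem.Str.join "" (L.map (fun c => String.ofList [c]))) := by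
  cases L with
  | nil => simp [PySem.List.len]
  | cons c t =>
    have hlen : (PySem.List.len ((c :: t).map (fun c => String.ofList [c])) == 0) = false := by
      simp [PySem.List.len]; omega
    have hne : ((c :: t : List Char) == []) = false := by simp
    have hget : PySem.List.pyGetD ((c :: t).map (fun c => String.ofList [c])) 0 "" = String.ofList [c] := by
      simp [PySem.List.pyGetD, PySem.List.pyIdx?, PySem.List.pyGet?]
    have hBget : PySem.List.pyGet? (c :: t) 0 = some c := by
      simp [PySem.List.pyGet?, PySem.List.pyIdx?]
    rw [hlen, hne]
    simp only [Bool.false_eq_true, if_false, hget, hBget]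
    by_cases hc : c = '0'
    · subst hc; simp
    · rw [sing_beq_zero_false c hc]
      have hbeq : (some c == some '0') = false := by simpa using hc
      rw [hbeq]
      simp only [Bool.false_eq_true, if_false]
      rw [foldl_concat_eq ((c :: t).map (fun c => String.ofList [c]))]
      apply String.toList_inj.mp
      rw [toList_foldl_concat, PySem.Str.toList_join]
      simp only [List.map_map]
      rw [show ((fun s => String.toList s) ∘ (fun c => String.ofList [c])) = (fun c => [c]) from by
            funext x; simp]
      rw [show ("".toList : List Char) = [] from rfl, join_nil_flatten]
      simp

-- ---------- B-side characterisation ----------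

theorem mem_blocksOf {ds : List Char} {a : Char → Nat} {x : Char}
    (h : x ∈ blocksOf ds a) : x ∈ ds := by
  simp only [blocksOf, List.mem_flatMap] at h
  obtain ⟨d, hd, hx⟩ := h
  rw [List.eq_of_mem_replicate hx]; exact hd

theorem mergeDesc_nil_right (l : List Char) : mergeDesc l [] = [] := by
  cases l <;> simp [mergeDesc]

theorem mergeDesc_drop_left (c : Char) (xs ys : List Char) (hy : ∀ y ∈ ys, y < c) :
    ∀ k, mergeDesc (List.replicate k c ++ xs) ys = mergeDesc xs ys := by
  intro k
  induction k with
  | zero => simp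
  | succ n ih =>
    cases ys with
    | nil => rw [mergeDesc_nil_right, mergeDesc_nil_right]
    | cons y ys' =>
      have hlt : y < c := hy y (by simp)
      rw [List.replicate_succ, List.cons_append]
      rw [show mergeDesc (c :: (List.replicate n c ++ xs)) (y :: ys')
            = mergeDesc (List.replicate n c ++ xs) (y :: ys') from by
        rw [mergeDesc]
        rw [if_neg (by exact fun h => absurd h (ne_of_gt hlt)), if_pos hlt]]
      exact ih

theorem mergeDesc_drop_right (c : Char) (xs ys : List Char) (hx : ∀ x ∈ xs, x < c) :
    ∀ k, mergeDesc xs (List.replicate k c ++ ys) = mergeDesc xs ys := by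
  intro k
  induction k with
  | zero => simp
  | succ n ih =>
    cases xs with
    | nil => simp [mergeDesc]
    | cons x xs' =>
      have hlt : x < c := hx x (by simp)
      rw [List.replicate_succ, List.cons_append]
      rw [show mergeDesc (x :: xs') (c :: (List.replicate n c ++ ys))
            = mergeDesc (x :: xs') (List.replicate n c ++ ys) from by
        rw [mergeDesc]
        rw [if_neg (by exact fun h => absurd h (ne_of_lt hlt)), if_neg (by exact not_lt_of_gt hlt)]]
      exact ih

theorem mergeDesc_blocks_head (c : Char) (xs ys : List Char)
    (hx : ∀ x ∈ xs, x < c) (hy : ∀ y ∈ ys, y < c) :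
    ∀ m n, mergeDesc (List.replicate m c ++ xs) (List.replicate n c ++ ys)
      = List.replicate (min m n) c ++ mergeDesc xs ys := by
  intro m
  induction m with
  | zero =>
    intro n
    simpa using mergeDesc_drop_right c xs ys hx n
  | succ p ih =>
    intro n
    cases n with
    | zero =>
      simpa using mergeDesc_drop_left c xs ys hy (p + 1)
    | succ q =>
      rw [List.replicate_succ, List.replicate_succ, List.cons_append, List.cons_append]
      rw [show mergeDesc (c :: (List.replicate p c ++ xs)) (c :: (List.replicate q c ++ ys))
            = c :: mergeDesc (List.replicate p c ++ xs) (List.replicate q c ++ ys) from by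
        rw [mergeDesc, if_pos rfl]]
      rw [ih q]
      rw [show min (p + 1) (q + 1) = min p q + 1 from by omega, List.replicate_succ, List.cons_append]

theorem mergeDesc_blocks (ds : List Char) (hds : ds.Pairwise (fun a b => b < a)) :
    ∀ a b : Char → Nat, mergeDesc (blocksOf ds a) (blocksOf ds b)
      = blocksOf ds (fun d => min (a d) (b d)) := by
  induction ds with
  | nil => intro a b; simp [blocksOf, mergeDesc]
  | cons d ds' ih =>
    intro a b
    have hhead := (List.pairwise_cons.mp hds).1
    have htail := (List.pairwise_cons.mp hds).2
    have hx : ∀ x ∈ blocksOf ds' a, x < d := fun x hx => hhead x (mem_blocksOf hx)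
    have hy : ∀ y ∈ blocksOf ds' b, y < d := fun y hy => hhead y (mem_blocksOf hy)
    show mergeDesc (List.replicate (a d) d ++ blocksOf ds' a)
          (List.replicate (b d) d ++ blocksOf ds' b) = _
    rw [mergeDesc_blocks_head d _ _ hx hy (a d) (b d), ih htail a b]
    rfl

theorem char_eq_iff_toNat (c d : Char) : c = d ↔ c.toNat = d.toNat := by
  constructor
  · rintro rfl; rfl
  · intro h
    have h1 := Char.ofNat_toNat c
    have h2 := Char.ofNat_toNat d
    rw [← h1, ← h2, h]

-- Python's c.isdigit() on a single char holds exactly for the ten digit characters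
theorem isdigit_iff_mem (c : Char) : PySem.Chars.isdigit c = true ↔ c ∈ descDigits := by
  simp only [PySem.Chars.isdigit, Bool.and_eq_true, decide_eq_true_eq, descDigits,
    List.mem_cons, List.not_mem_nil, or_false, char_eq_iff_toNat]
  rw [Char.le_def, Char.le_def, UInt32.le_iff_toNat_le, UInt32.le_iff_toNat_le]
  have e0 : (('0':Char).val.toNat) = 48 := rfl
  have e9 : (('9':Char).val.toNat) = 57 := rfl
  rw [e0, e9]
  have f0 : (('0':Char).toNat) = 48 := rfl
  have f1 : (('1':Char).toNat) = 49 := rfl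
  have f2 : (('2':Char).toNat) = 50 := rfl
  have f3 : (('3':Char).toNat) = 51 := rfl
  have f4 : (('4':Char).toNat) = 52 := rfl
  have f5 : (('5':Char).toNat) = 53 := rfl
  have f6 : (('6':Char).toNat) = 54 := rfl
  have f7 : (('7':Char).toNat) = 55 := rfl
  have f8 : (('8':Char).toNat) = 56 := rfl
  have f9 : (('9':Char).toNat) = 57 := rfl
  rw [f0, f1, f2, f3, f4, f5, f6, f7, f8, f9]
  show 48 ≤ c.toNat ∧ c.toNat ≤ 57 ↔ _
  omega

-- count of a char in the canonical block list
theorem count_blocksOf (ds : List Char) (hds : ds.Nodup) (a : Char → Nat) (c : Char) :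
    (blocksOf ds a).count c = if c ∈ ds then a c else 0 := by
  induction ds with
  | nil => simp [blocksOf]
  | cons d ds' ih =>
    have hnd : d ∉ ds' := (List.nodup_cons.mp hds).1
    have htl : ds'.Nodup := (List.nodup_cons.mp hds).2
    show (List.replicate (a d) d ++ blocksOf ds' a).count c = _
    rw [List.count_append, List.count_replicate, ih htl]
    by_cases hc : c = d
    · subst hc
      simp [hnd]
    · simp [hc, Ne.symm hc]

theorem digitsDesc_eq (s : String) :
    digitsDesc s = blocksOf descDigits (fun d => s.toList.count d) := by
  unfold digitsDesc
  rw [sorted_rev_eq_dual]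
  rw [PySem.List.sorted_eq_sorted_of_perm _
        (blocksOf descDigits (fun d => s.toList.count d)) _ OrderDual.toDual.injective ?hperm]
  · refine PySem.List.sorted_eq_self_of_pairwise _ _ ?_
    have hp : descDigits.Pairwise (fun c d => d ≤ c) := by decide
    exact (pairwise_desc_flatMap descDigits (fun d => s.toList.count d) (fun d => d) hp).imp
      (fun h => h)
  · case hperm =>
    refine List.perm_iff_count.mpr ?_
    intro c
    rw [count_blocksOf descDigits (by decide) _ c]
    by_cases hc : c ∈ descDigits
    · rw [if_pos hc]
      exact List.count_filter ((isdigit_iff_mem c).mpr hc)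
    · rw [if_neg hc]
      refine List.count_eq_zero.mpr ?_
      intro hmem
      exact hc ((isdigit_iff_mem c).mp (List.of_mem_filter hmem))

theorem merged_eq (X Y : String) :
    mergeDesc (digitsDesc X) (digitsDesc Y) = blocksOf descDigits (mcSol X Y) := by
  rw [digitsDesc_eq, digitsDesc_eq,
      mergeDesc_blocks descDigits (by decide) (fun d => X.toList.count d) (fun d => Y.toList.count d)]
  rfl

-- ===== VERDICT (by name: the statement is the Claim_ definition above) =====
theorem solution_spec : Claim_equal_solution := by
  intro X Y _
  show solution X Y = solution_alt X Y
  unfold solution solution_alt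
  dsimp only
  rw [check_eq, sorted_check, flatMap_replicate_map, merged_eq]
  exact final_branches (blocksOf descDigits (mcSol X Y))
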